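-- pv_equiv track=rewrite | github.com/stargazingdave/self_orlog | rl/eval/run_head2head.py | mask_to_exact_k_indices
-- ===== SOURCE A (Python) =====
-- def mask_to_exact_k_indices(mask: int, k: int) -> list[int]:
--     k = max(0, min(6, int(k)))
--
--     ones = [i for i in range(6) if ((mask >> i) & 1) == 1]
--     if len(ones) > k:
--         return ones[:k]
--
--     if len(ones) < k:
--         for i in range(6):
--             if i not in ones:
--                 ones.append(i)
--                 if len(ones) == k:
--                     break
--
--     return ones
-- ===== SOURCE B (Python) =====
-- def mask_to_exact_k_indices(mask: int, k: int) -> list[int]: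
--     k = max(0, min(6, int(k)))
--     keyed = sorted((1 - ((mask >> i) & 1), i) for i in range(6))
--     return [i for _, i in keyed[:k]]
-- ===== Notes on version B (the rewrite author's own statement) =====
-- stated objective: simpler
-- what changed: Replaces A's three-way branch (truncate / membership-scan pad loop with break / return as-is) by a decorate-sort-undecorate: sort the (bit-unset-priority, index) pairs lexicographically and take the first k indices.
import Mathlib
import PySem

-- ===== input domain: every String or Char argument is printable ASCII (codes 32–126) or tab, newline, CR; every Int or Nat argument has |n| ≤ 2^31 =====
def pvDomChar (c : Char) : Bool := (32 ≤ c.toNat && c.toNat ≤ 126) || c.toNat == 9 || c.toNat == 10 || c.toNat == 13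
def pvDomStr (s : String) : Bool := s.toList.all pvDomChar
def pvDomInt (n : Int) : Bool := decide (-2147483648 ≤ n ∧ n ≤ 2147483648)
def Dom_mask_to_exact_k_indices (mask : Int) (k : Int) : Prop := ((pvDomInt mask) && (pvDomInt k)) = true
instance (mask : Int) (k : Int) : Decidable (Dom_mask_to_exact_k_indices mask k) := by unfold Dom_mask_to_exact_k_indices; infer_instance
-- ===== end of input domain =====

-- B replaces A's truncate-or-pad branch logic by a decorate-sort-undecorate: sort (priority, index) pairs and slice; objective: simpler.

-- ===== PORT A =====
-- Python's 'mask >> i' (i is always 0..5 here, a Nat): Lean's '>>>' on Int with a Nat shift, per PySem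
def pvShr (a : Int) (n : Nat) : Int := a >>> n

-- the 'for i in range(6): if i not in ones: ones.append(i); if len(ones)==k: break' padding loop
def pvPadA (k : Int) : List Int → List Int → List Int
  | [], ones => ones
  | i :: rest, ones =>
    if i ∈ ones then pvPadA k rest ones
    else
      let ones' := ones ++ [i]
      if (ones'.length : Int) = k then ones' else pvPadA k rest ones'

def mask_to_exact_k_indices (mask : Int) (k : Int) : List Int :=
  let k := max 0 (min 6 k)
  let ones := (PySem.List.pyRange 0 6 1).filter (fun i => PySem.Int.band (pvShr mask i.toNat) 1 == 1)
  if (ones.length : Int) > k then PySem.List.slice ones none (some k)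
  else if (ones.length : Int) < k then pvPadA k (PySem.List.pyRange 0 6 1) ones
  else ones

-- ===== PORT B =====
-- sorted(...) of 2-tuples compares lexicographically: PySem.List.sorted2 with the two projections
def mask_to_exact_k_indices_alt (mask : Int) (k : Int) : List Int :=
  let k := max 0 (min 6 k)
  let keyed := PySem.List.sorted2
      ((PySem.List.pyRange 0 6 1).map (fun i => (1 - PySem.Int.band (pvShr mask i.toNat) 1, i)))
      (fun p => p.1) (fun p => p.2) false
  (PySem.List.slice keyed none (some k)).map (fun p => p.2)

-- ===== PRECONDITION & SPEC =====
def Spec_mask_to_exact_k_indices (mask : Int) (k : Int) (out : List Int) : Prop := out = mask_to_exact_k_indices_alt mask k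
instance (mask : Int) (k : Int) (out : List Int) : Decidable (Spec_mask_to_exact_k_indices mask k out) := by unfold Spec_mask_to_exact_k_indices; infer_instance

-- ===== CLAIM =====
def Claim_equal_mask_to_exact_k_indices : Prop := ∀ (mask : Int) (k : Int), Dom_mask_to_exact_k_indices mask k → Spec_mask_to_exact_k_indices mask k (mask_to_exact_k_indices mask k)

-- ===== LEMMAS AND PROOFS =====

-- bit i of mask (i < 6) is determined by mask % 64
theorem pvBit_mod64 (mask : Int) (i : Nat) (hi : i < 6) :
    PySem.Int.band (pvShr mask i) 1 = PySem.Int.band (pvShr (mask % 64) i) 1 := by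
  simp only [pvShr]
  rw [PySem.Int.band_one, PySem.Int.band_one,
      PySem.Int.mod_eq_emod_of_pos (by omega), PySem.Int.mod_eq_emod_of_pos (by omega),
      Int.shiftRight_eq_div_pow, Int.shiftRight_eq_div_pow]
  interval_cases i <;> norm_num <;> omega

theorem pvRange6 : PySem.List.pyRange 0 6 1 = [0, 1, 2, 3, 4, 5] := by decide

theorem pvClampIdem (k : Int) : max 0 (min 6 (max 0 (min 6 k))) = max 0 (min 6 k) := by omega

theorem pvFilt (mask : Int) :
    List.filter (fun i => PySem.Int.band (pvShr mask i.toNat) 1 == 1) [0, 1, 2, 3, 4, 5] =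
    List.filter (fun i => PySem.Int.band (pvShr (mask % 64) i.toNat) 1 == 1) [(0 : Int), 1, 2, 3, 4, 5] := by
  refine List.filter_congr ?_
  intro i hi
  fin_cases hi <;> exact congrArg (· == 1) (pvBit_mod64 mask _ (by omega))

theorem pvMap6 (mask : Int) :
    List.map (fun i => (1 - PySem.Int.band (pvShr mask i.toNat) 1, i)) [(0 : Int), 1, 2, 3, 4, 5] =
    List.map (fun i => (1 - PySem.Int.band (pvShr (mask % 64) i.toNat) 1, i)) [(0 : Int), 1, 2, 3, 4, 5] := by
  simp only [List.map_cons, List.map_nil]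
  norm_num
  exact ⟨pvBit_mod64 mask 0 (by omega), pvBit_mod64 mask 1 (by omega), pvBit_mod64 mask 2 (by omega),
         pvBit_mod64 mask 3 (by omega), pvBit_mod64 mask 4 (by omega), pvBit_mod64 mask 5 (by omega)⟩

theorem pvA_reduce (mask k : Int) :
    mask_to_exact_k_indices mask k = mask_to_exact_k_indices (mask % 64) (max 0 (min 6 k)) := by
  simp only [mask_to_exact_k_indices, pvRange6, pvClampIdem]
  rw [pvFilt mask]

theorem pvB_reduce (mask k : Int) :
    mask_to_exact_k_indices_alt mask k = mask_to_exact_k_indices_alt (mask % 64) (max 0 (min 6 k)) := by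
  simp only [mask_to_exact_k_indices_alt, pvRange6, pvClampIdem]
  rw [pvMap6 mask]

theorem pvFinite : ∀ m ∈ List.range 64, ∀ kk ∈ List.range 7,
    mask_to_exact_k_indices (m : Int) (kk : Int) = mask_to_exact_k_indices_alt (m : Int) (kk : Int) := by
  decide

-- ===== VERDICT =====
theorem mask_to_exact_k_indices_spec : Claim_equal_mask_to_exact_k_indices := by
  intro mask k _
  unfold Spec_mask_to_exact_k_indices
  rw [pvA_reduce, pvB_reduce]
  have h1 : 0 ≤ mask % 64 := Int.emod_nonneg mask (by omega)
  have h2 : mask % 64 < 64 := Int.emod_lt_of_pos mask (by omega)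
  have e1 : (mask % 64) = (((mask % 64).toNat : Nat) : Int) := by omega
  have e2 : (max 0 (min 6 k)) = (((max 0 (min 6 k)).toNat : Nat) : Int) := by omega
  rw [e1, e2]
  exact pvFinite _ (List.mem_range.mpr (by omega)) _ (List.mem_range.mpr (by omega))
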